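-- pv_equiv track=rewrite | github.com/PMCC-BioinformaticsCore/janis-core | janis_core/tests/test_janis_translate.py | _get_nf_process_script_lines
-- ===== SOURCE A (Python) =====
-- def _get_nf_process_script_lines(process_text: str) -> list[str]:
--     """Returns the lines of the process script"""
--     out: list[str] = []
--     lines = process_text.split('\n')
--     within_script: bool = False
--
--     for i in range(len(lines)):
--         if lines[i].strip() == '"""' and not within_script:
--             within_script = True
--             continue
--         if lines[i].strip() == '"""' and within_script:
--             within_script = False
--             continue
--         if within_script:
--             out.append(lines[i])
--
--     return out
-- ===== SOURCE B (Python) =====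
-- def _get_nf_process_script_lines(process_text: str) -> list[str]:
--     """Split the lines on marker lines into segments, then keep the
--     odd-indexed segments (those between the (2k+1)-th and (2k+2)-th markers,
--     plus the trailing segment after a final unpaired marker)."""
--     lines = process_text.split('\n')
--     segments = _split_on_markers(lines)
--     return _odd_segments(segments)
--
--
-- def _split_on_markers(lines: list[str]) -> list[list[str]]:
--     segments: list[list[str]] = []
--     cur: list[str] = []
--     for ln in lines:
--         if ln.strip() == '"""':
--             segments.append(cur)
--             cur = []
--         else:
--             cur.append(ln)
--     segments.append(cur)
--     return segments
--
--
-- def _odd_segments(segments: list[list[str]]) -> list[str]: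
--     if len(segments) < 2:
--         return []
--     return segments[1] + _odd_segments(segments[2:])
-- ===== Notes on version B (the rewrite author's own statement) =====
-- stated objective: alternative
-- what changed: Replaces the boolean within_script state machine with a split-then-select decomposition: the lines are partitioned into segments at marker lines, and the odd-indexed segments are concatenated.
import Mathlib
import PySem

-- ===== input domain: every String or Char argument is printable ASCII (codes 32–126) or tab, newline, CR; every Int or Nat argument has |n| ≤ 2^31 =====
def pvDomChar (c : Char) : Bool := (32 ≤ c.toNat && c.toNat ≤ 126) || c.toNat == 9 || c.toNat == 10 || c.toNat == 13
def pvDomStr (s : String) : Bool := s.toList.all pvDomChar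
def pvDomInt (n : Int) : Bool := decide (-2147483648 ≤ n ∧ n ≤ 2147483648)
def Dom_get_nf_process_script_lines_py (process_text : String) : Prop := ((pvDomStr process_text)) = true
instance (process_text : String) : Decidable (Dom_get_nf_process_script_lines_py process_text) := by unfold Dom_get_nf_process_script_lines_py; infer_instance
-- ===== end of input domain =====

-- B replaces A's within_script state machine with a split-then-select decomposition
-- (partition the lines at marker lines, concatenate the odd-indexed segments); objective: alternative.

-- ===== PORT A =====
-- loop body of A's for-loop: state is (out, within_script)
def pvStepA (st : List String × Bool) (l : String) : List String × Bool :=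
  if PySem.Str.strip l = "\"\"\"" ∧ st.2 = false then (st.1, true)
  else if PySem.Str.strip l = "\"\"\"" ∧ st.2 = true then (st.1, false)
  else if st.2 = true then (st.1 ++ [l], st.2)
  else st

def get_nf_process_script_lines_py (process_text : String) : List String :=
  let lines := (PySem.Str.split? process_text "\n").getD []
  (lines.foldl pvStepA ([], false)).1

-- ===== PORT B =====
-- _split_on_markers: state is (segments, cur); after the loop, segments.append(cur)
def pvStepB (st : List (List String) × List String) (l : String) : List (List String) × List String :=
  if PySem.Str.strip l = "\"\"\"" then (st.1 ++ [st.2], [])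
  else (st.1, st.2 ++ [l])

def pvSplitOnMarkers (lines : List String) : List (List String) :=
  let r := lines.foldl pvStepB ([], [])
  r.1 ++ [r.2]

-- _odd_segments: recursion consuming two segments at a time
def pvOddSegments : List (List String) → List String
  | [] => []
  | [_] => []
  | _ :: s :: rest => s ++ pvOddSegments rest

def get_nf_process_script_lines_py_alt (process_text : String) : List String :=
  let lines := (PySem.Str.split? process_text "\n").getD []
  pvOddSegments (pvSplitOnMarkers lines)

-- ===== PRECONDITION & SPEC =====
def Spec_get_nf_process_script_lines_py (process_text : String) (out : List String) : Prop := out = get_nf_process_script_lines_py_alt process_text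
instance (process_text : String) (out : List String) : Decidable (Spec_get_nf_process_script_lines_py process_text out) := by unfold Spec_get_nf_process_script_lines_py; infer_instance

-- ===== CLAIM (what is proved, stated in full; the proofs are below) =====
def Claim_equal_get_nf_process_script_lines_py : Prop := ∀ (process_text : String), Dom_get_nf_process_script_lines_py process_text → Spec_get_nf_process_script_lines_py process_text (get_nf_process_script_lines_py process_text)

-- ===== LEMMAS AND PROOFS =====

-- proof-side recursion computing A's loop result without the accumulator
def pvARec : List String → Bool → List String
  | [], _ => []
  | l :: ls, w =>
    if PySem.Str.strip l = "\"\"\"" then pvARec ls (!w)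
    else if w then l :: pvARec ls w else pvARec ls w

-- proof-side recursion computing B's segment split without the accumulator
def pvSegsAux : List String → List String → List (List String)
  | [], cur => [cur]
  | l :: ls, cur =>
    if PySem.Str.strip l = "\"\"\"" then cur :: pvSegsAux ls []
    else pvSegsAux ls (cur ++ [l])

-- alternating concatenation: keep a segment iff the flag is set, toggling each step
def pvAltC : Bool → List (List String) → List String
  | _, [] => []
  | b, s :: ss => (if b then s else []) ++ pvAltC (!b) ss

theorem pvFoldA_eq (lines : List String) : ∀ (out : List String) (w : Bool),
    (lines.foldl pvStepA (out, w)).1 = out ++ pvARec lines w := by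
  induction lines with
  | nil => intro out w; simp [pvARec]
  | cons l ls ih =>
    intro out w
    by_cases hm : PySem.Str.strip l = "\"\"\"" <;> cases w <;>
      simp [pvStepA, pvARec, hm, ih]

theorem pvFoldB_eq (lines : List String) : ∀ (segs : List (List String)) (cur : List String),
    (lines.foldl pvStepB (segs, cur)).1 ++ [(lines.foldl pvStepB (segs, cur)).2]
      = segs ++ pvSegsAux lines cur := by
  induction lines with
  | nil => intro segs cur; simp [pvSegsAux]
  | cons l ls ih =>
    intro segs cur
    by_cases hm : PySem.Str.strip l = "\"\"\"" <;>
      simp [pvStepB, pvSegsAux, hm, ih]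

theorem pvAltC_segsAux (lines : List String) : ∀ (cur : List String) (w : Bool),
    pvAltC w (pvSegsAux lines cur) = (if w then cur else []) ++ pvARec lines w := by
  induction lines with
  | nil => intro cur w; cases w <;> simp [pvSegsAux, pvAltC, pvARec]
  | cons l ls ih =>
    intro cur w
    by_cases hm : PySem.Str.strip l = "\"\"\"" <;> cases w <;>
      simp [pvSegsAux, pvAltC, pvARec, hm, ih]

theorem pvOddSegments_eq_altC (segs : List (List String)) :
    pvOddSegments segs = pvAltC false segs := by
  induction segs using pvOddSegments.induct with
  | case1 => simp [pvOddSegments, pvAltC]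
  | case2 s => simp [pvOddSegments, pvAltC]
  | case3 a s rest ih => simp [pvOddSegments, pvAltC, ih]

-- ===== VERDICT (by name: the statement is the Claim_ definition above) =====
theorem get_nf_process_script_lines_py_spec : Claim_equal_get_nf_process_script_lines_py := by
  intro process_text _
  unfold Spec_get_nf_process_script_lines_py
  unfold get_nf_process_script_lines_py get_nf_process_script_lines_py_alt pvSplitOnMarkers
  simp only [pvFoldA_eq, pvFoldB_eq, pvOddSegments_eq_altC, pvAltC_segsAux, List.nil_append,
    if_neg Bool.false_ne_true]
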